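-- pv_equiv track=rewrite | github.com/BaciuMaria/CALCUL-NUMERIC-2024 | Lab6/tema6.py | schema_lui_Aitken
-- ===== SOURCE A (Python) =====
-- def schema_lui_Aitken(x, y):
--     n = len(x)
--     y_nou = []
--     for i in range(n):
--         row = [0] * n
--         y_nou.append(row)
--
--     for i in range(n):
--         y_nou[i][0] = y[i]
--
--     for k in range(1, n + 1):
--         for i in range(k, n):
--             y_nou[i][k] = y_nou[i][k - 1] - y_nou[i - 1][k - 1]
--             if k == i:
--                 y[i] = y_nou[i][k]
--
--     return y
-- ===== SOURCE B (Python) =====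
-- def schema_lui_Aitken(x, y):
--     # Closed form: the i-th diagonal of the difference table is sum_j (-1)**(i-j)*C(i,j)*y[j].
--     # Builds binomial rows by Pascal's rule; no difference table. Return-value equivalence only:
--     # A mutates y in place, B does not.
--     n = len(x)
--     out = []
--     row = [1]
--     for i in range(n):
--         if i:
--             row = [1] + [row[j] + row[j + 1] for j in range(i - 1)] + [1]
--         acc = 0
--         for j in range(i + 1):
--             c = row[j] * y[j]
--             acc = acc + c if (i - j) % 2 == 0 else acc - c
--         out.append(acc)
--     return out + y[n:]
-- ===== Notes on version B (the rewrite author's own statement) =====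
-- stated objective: alternative
-- what changed: B replaces A's n x n difference-table recurrence by the closed-form binomial expansion y[i] = sum_j (-1)^(i-j)*C(i,j)*y[j] (Pascal-row coefficients, one dot product per output), exact on the integer inputs of this task; equivalence is about the return value (A mutates y in place, B does not).
import Mathlib
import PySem

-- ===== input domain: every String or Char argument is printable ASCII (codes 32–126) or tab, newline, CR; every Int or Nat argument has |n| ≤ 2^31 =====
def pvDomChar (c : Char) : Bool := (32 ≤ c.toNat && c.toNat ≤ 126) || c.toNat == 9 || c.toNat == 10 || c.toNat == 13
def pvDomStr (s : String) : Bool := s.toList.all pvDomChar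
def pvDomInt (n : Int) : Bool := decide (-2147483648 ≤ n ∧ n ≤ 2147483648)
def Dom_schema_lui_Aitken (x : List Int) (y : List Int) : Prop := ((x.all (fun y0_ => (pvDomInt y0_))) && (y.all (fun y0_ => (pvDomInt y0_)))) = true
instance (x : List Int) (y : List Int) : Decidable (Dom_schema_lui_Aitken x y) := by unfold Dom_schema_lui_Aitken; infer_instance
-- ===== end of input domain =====

-- B replaces A's n×n difference-table recurrence by the closed-form binomial expansion
-- y[i] = Σⱼ (-1)^(i-j)·C(i,j)·y[j] (Pascal-row coefficients), exact on these integer inputs;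
-- the agreement proved is about the RETURN value only: A mutates y in place, B does not.

-- ===== PORT A =====
-- Literal port of A: build the n×n zero table, write column 0 from y, then fill columns 1..n,
-- copying the diagonal entry into y when k == i.  All index accesses are in range under
-- Pre_schema_lui_Aitken (len x ≤ len y), so getD/set are exact there.
def schema_lui_Aitken (x : List Int) (y : List Int) : List Int :=
  let n := x.length
  let y_nou : List (List Int) := (List.range n).foldl (fun t _ => t ++ [List.replicate n (0 : Int)]) []
  let y_nou := (List.range n).foldl (fun t i => t.set i ((t.getD i []).set 0 (y.getD i 0))) y_nou
  let st := (List.range' 1 n).foldl (fun (st : List (List Int) × List Int) k =>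
      (List.range' k (n - k)).foldl (fun (st : List (List Int) × List Int) i =>
        let v := (st.1.getD i []).getD (k - 1) 0 - (st.1.getD (i - 1) []).getD (k - 1) 0
        let t := st.1.set i ((st.1.getD i []).set k v)
        let y' := if k = i then st.2.set i v else st.2
        (t, y')) st) (y_nou, y)
  st.2

-- ===== PORT B =====
-- Literal port of Source B: carry (out, row) through i = 0..n-1; for i ≥ 1 rebuild the Pascal row
-- [1] + [row[j]+row[j+1] for j in range(i-1)] + [1], then accumulate the alternating dot product.
def schema_lui_Aitken_alt (x : List Int) (y : List Int) : List Int :=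
  let n := x.length
  let st := (List.range n).foldl (fun (st : List Int × List Int) i =>
      let row := if i ≠ 0 then
          [(1 : Int)] ++ (List.range (i - 1)).map (fun j => st.2.getD j 0 + st.2.getD (j + 1) 0) ++ [(1 : Int)]
        else st.2
      let acc := (List.range (i + 1)).foldl (fun acc j =>
          let c := row.getD j 0 * y.getD j 0
          if (i - j) % 2 = 0 then acc + c else acc - c) 0
      (st.1 ++ [acc], row)) ([], [(1 : Int)])
  st.1 ++ y.drop n

-- ===== PRECONDITION & SPEC =====
-- Pre_ excludes exactly the inputs on which A raises IndexError (y shorter than x); A returns on all of Pre_.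
def Pre_schema_lui_Aitken (x : List Int) (y : List Int) : Prop := x.length ≤ y.length
instance (x : List Int) (y : List Int) : Decidable (Pre_schema_lui_Aitken x y) := by unfold Pre_schema_lui_Aitken; infer_instance
def pvWitness_schema_lui_Aitken : List Int × List Int := ([1, 2, 4], [3, 1, 5])

def Spec_schema_lui_Aitken (x : List Int) (y : List Int) (out : List Int) : Prop := out = schema_lui_Aitken_alt x y
instance (x : List Int) (y : List Int) (out : List Int) : Decidable (Spec_schema_lui_Aitken x y out) := by unfold Spec_schema_lui_Aitken; infer_instance

-- ===== CLAIM (what is proved, stated in full; the proofs are below) =====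
def Claim_equal_schema_lui_Aitken : Prop := ∀ (x : List Int) (y : List Int), Dom_schema_lui_Aitken x y → Pre_schema_lui_Aitken x y → Spec_schema_lui_Aitken x y (schema_lui_Aitken x y)

-- ===== LEMMAS AND PROOFS =====

-- pairwise differences of a list; fD y n i k = the k-th forward difference read at row i
def pvDiffs (l : List Int) : List Int := List.zipWith (fun a b => b - a) l l.tail
def fD (y : List Int) (n i k : Nat) : Int := (pvDiffs^[k] (y.take n)).getD (i - k) 0
-- entry (i, j) of A's table
def eT (t : List (List Int)) (i j : Nat) : Int := (t.getD i []).getD j 0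

theorem pvDiffs_length (l : List Int) : (pvDiffs l).length = l.length - 1 := by
  simp [pvDiffs]

theorem iter_pvDiffs_length (k : Nat) (l : List Int) :
    (pvDiffs^[k] l).length = l.length - k := by
  induction k generalizing l with
  | zero => simp
  | succ k ih => rw [Function.iterate_succ_apply', pvDiffs_length, ih]; omega

theorem pvDiffs_getD (l : List Int) (j : Nat) (h : j + 1 < l.length) :
    (pvDiffs l).getD j 0 = l.getD (j + 1) 0 - l.getD j 0 := by
  have h1 : j < (pvDiffs l).length := by rw [pvDiffs_length]; omega
  rw [List.getD_eq_getElem _ _ h1, List.getD_eq_getElem _ _ h,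
    List.getD_eq_getElem _ _ (by omega : j < l.length)]
  simp [pvDiffs, List.getElem_tail]

theorem fD_rec (y : List Int) (n i k : Nat) (hk : 1 ≤ k) (hki : k ≤ i) (hin : i < n)
    (hny : n ≤ y.length) :
    fD y n i k = fD y n i (k - 1) - fD y n (i - 1) (k - 1) := by
  have hlen : (pvDiffs^[k - 1] (y.take n)).length = n - (k - 1) := by
    rw [iter_pvDiffs_length, List.length_take]; omega
  have hk' : k = (k - 1) + 1 := by omega
  rw [fD, hk', Function.iterate_succ_apply', pvDiffs_getD _ _ (by omega)]
  unfold fD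
  congr 2 <;> omega

theorem fD_zero (y : List Int) (n i : Nat) (hin : i < n) (hny : n ≤ y.length) :
    fD y n i 0 = y.getD i 0 := by
  unfold fD
  rw [Function.iterate_zero_apply, Nat.sub_zero,
    List.getD_eq_getElem _ _ (by simp; omega : i < (y.take n).length),
    List.getD_eq_getElem _ _ (by omega : i < y.length)]
  simp

-- getD/set bookkeeping
theorem getD_set_self {α : Type} (l : List α) (i : Nat) (a d : α) (h : i < l.length) :
    (l.set i a).getD i d = a := by
  rw [List.getD_eq_getElem _ _ (by simpa using h)]
  simp

theorem getD_set_ne {α : Type} (l : List α) (i j : Nat) (a d : α) (h : i ≠ j) :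
    (l.set i a).getD j d = l.getD j d := by
  simp [List.getD, List.getElem?_set_ne h]

-- ---------- A-side invariants ----------

-- table invariant: columns ≤ km correct on and below the diagonal
def InvT (y : List Int) (n : Nat) (t : List (List Int)) (km : Nat) : Prop :=
  t.length = n ∧ (∀ i, i < n → (t.getD i []).length = n) ∧
  (∀ i j, i < n → j ≤ i → j ≤ km → eT t i j = fD y n i j)

-- during column k: columns < k everywhere, column k for rows < b
def InvC (y : List Int) (n : Nat) (t : List (List Int)) (k b : Nat) : Prop :=
  t.length = n ∧ (∀ i, i < n → (t.getD i []).length = n) ∧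
  (∀ i j, i < n → j ≤ i → j ≤ k - 1 → eT t i j = fD y n i j) ∧
  (∀ i, k ≤ i → i < b → eT t i k = fD y n i k)

-- y-state after the first K outer iterations
def InvY (y : List Int) (n : Nat) (yc : List Int) (K : Nat) : Prop :=
  ∀ j : Nat, yc[j]? = if 1 ≤ j ∧ j ≤ K ∧ j < n then some (fD y n j j) else y[j]?

-- one inner step of port A, named so the fold lemmas can speak about it
def stepA (k : Nat) (st : List (List Int) × List Int) (i : Nat) : List (List Int) × List Int :=
  let v := (st.1.getD i []).getD (k - 1) 0 - (st.1.getD (i - 1) []).getD (k - 1) 0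
  let t := st.1.set i ((st.1.getD i []).set k v)
  let y' := if k = i then st.2.set i v else st.2
  (t, y')

theorem inner_loop (y : List Int) (n : Nat) (hny : n ≤ y.length) (k : Nat) (hk : 1 ≤ k) :
    ∀ (m i0 : Nat) (t : List (List Int)) (yc : List Int), k ≤ i0 → i0 + m ≤ n →
      InvC y n t k i0 →
      InvC y n ((List.range' i0 m).foldl (stepA k) (t, yc)).1 k (i0 + m) ∧
      ((List.range' i0 m).foldl (stepA k) (t, yc)).2 =
        (if i0 = k ∧ m ≠ 0 then yc.set k (fD y n k k) else yc) := by
  intro m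
  induction m with
  | zero => intro i0 t yc hki h0 hI; simpa using hI
  | succ m ih =>
    intro i0 t yc hki h0 hI
    obtain ⟨hlen, hrow, hcols, hcolk⟩ := hI
    have hi0n : i0 < n := by omega
    rw [List.range'_succ, List.foldl_cons]
    have hvval : fD y n i0 (k - 1) - fD y n (i0 - 1) (k - 1) = fD y n i0 k :=
      (fD_rec y n i0 k hk hki hi0n hny).symm
    have hv1 : (t.getD i0 []).getD (k - 1) 0 = fD y n i0 (k - 1) :=
      hcols i0 (k - 1) hi0n (by omega) (by omega)
    have hv2 : (t.getD (i0 - 1) []).getD (k - 1) 0 = fD y n (i0 - 1) (k - 1) :=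
      hcols (i0 - 1) (k - 1) (by omega) (by omega) (by omega)
    have hst : stepA k (t, yc) i0 =
        (t.set i0 ((t.getD i0 []).set k (fD y n i0 k)),
         if k = i0 then yc.set i0 (fD y n i0 k) else yc) := by
      simp only [stepA, eT] at *
      rw [hv1, hv2, hvval]
    rw [hst]
    have hInv' : InvC y n (t.set i0 ((t.getD i0 []).set k (fD y n i0 k))) k (i0 + 1) := by
      refine ⟨by simpa using hlen, ?_, ?_, ?_⟩
      · intro i hi
        by_cases hii : i0 = i
        · subst hii
          rw [getD_set_self _ _ _ _ (by omega)]
          simpa using hrow i0 hi0n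
        · rw [getD_set_ne _ _ _ _ _ hii]; exact hrow i hi
      · intro i j hi hji hjk
        by_cases hii : i0 = i
        · subst hii
          unfold eT
          rw [getD_set_self _ _ _ _ (by omega),
            getD_set_ne _ _ _ _ _ (by omega : k ≠ j)]
          exact hcols i0 j hi hji hjk
        · unfold eT
          rw [getD_set_ne _ _ _ _ _ hii]
          exact hcols i j hi hji hjk
      · intro i hkile hilt
        by_cases hii : i0 = i
        · subst hii
          unfold eT
          rw [getD_set_self _ _ _ _ (by omega),
            getD_set_self _ _ _ _ (by rw [hrow i0 hi0n]; omega)]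
        · unfold eT
          rw [getD_set_ne _ _ _ _ _ hii]
          exact hcolk i hkile (by omega)
    have hres := ih (i0 + 1) _ (if k = i0 then yc.set i0 (fD y n i0 k) else yc) (by omega) (by omega) hInv'
    constructor
    · have h1 := hres.1
      have : i0 + 1 + m = i0 + (m + 1) := by omega
      rwa [this] at h1
    · rw [hres.2]
      have hne : ¬ (i0 + 1 = k ∧ m ≠ 0) := by omega
      simp only [hne, if_false]
      by_cases hik : i0 = k
      · subst hik
        simp
      · have : ¬ k = i0 := fun h => hik h.symm
        simp only [this, if_false]
        have : ¬ (i0 = k ∧ m + 1 ≠ 0) := by tauto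
        simp only [this, if_false]

-- the outer loop: after processing all k = k0..n, InvY holds at n
theorem outer_loop (y : List Int) (n : Nat) (hny : n ≤ y.length) :
    ∀ (m k0 : Nat) (t : List (List Int)) (yc : List Int), 1 ≤ k0 → k0 + m = n + 1 →
      InvT y n t (k0 - 1) → InvY y n yc (k0 - 1) →
      InvY y n ((List.range' k0 m).foldl
        (fun (st : List (List Int) × List Int) k => (List.range' k (n - k)).foldl (stepA k) st) (t, yc)).2 n := by
  intro m
  induction m with
  | zero =>
    intro k0 t yc hk0 hkn hT hY
    simp only [List.range'_zero, List.foldl_nil]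
    intro j
    rw [hY j]
    have : (1 ≤ j ∧ j ≤ k0 - 1 ∧ j < n) ↔ (1 ≤ j ∧ j ≤ n ∧ j < n) := by omega
    exact if_congr this rfl rfl
  | succ m ih =>
    intro k0 t yc hk0 hkn hT hY
    rw [List.range'_succ, List.foldl_cons]
    obtain ⟨hlen, hrow, hcol⟩ := hT
    have hICinit : InvC y n t k0 k0 :=
      ⟨hlen, hrow, fun i j hi hji hjk => hcol i j hi hji hjk, fun i h1 h2 => absurd h2 (by omega)⟩
    have hin := inner_loop y n hny k0 hk0 (n - k0) k0 t yc (le_refl _) (by omega) hICinit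
    have hyclen : yc.length = y.length := by
      rcases Nat.lt_trichotomy yc.length y.length with h | h | h
      · exfalso
        have hnone : yc[yc.length]? = none := List.getElem?_eq_none (le_refl _)
        rw [hY yc.length] at hnone
        by_cases hc : 1 ≤ yc.length ∧ yc.length ≤ k0 - 1 ∧ yc.length < n
        · rw [if_pos hc] at hnone; simp at hnone
        · rw [if_neg hc, List.getElem?_eq_getElem h] at hnone
          simp at hnone
      · exact h
      · exfalso
        have hsome := hY y.length
        have hc : ¬ (1 ≤ y.length ∧ y.length ≤ k0 - 1 ∧ y.length < n) := by omega
        rw [if_neg hc, List.getElem?_eq_none (le_refl _)] at hsome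
        rw [List.getElem?_eq_getElem h] at hsome
        simp at hsome
    have hY' : InvY y n ((List.range' k0 (n - k0)).foldl (stepA k0) (t, yc)).2 k0 := by
      rw [hin.2]
      by_cases hcase : k0 = k0 ∧ n - k0 ≠ 0
      · rw [if_pos hcase]
        intro j
        by_cases hj : j = k0
        · rw [hj, List.getElem?_set_self (l := yc) (a := fD y n k0 k0) (by omega)]
          have hc : 1 ≤ k0 ∧ k0 ≤ k0 ∧ k0 < n := by omega
          rw [if_pos hc]
        · rw [List.getElem?_set_ne (by omega), hY j]
          have : (1 ≤ j ∧ j ≤ k0 - 1 ∧ j < n) ↔ (1 ≤ j ∧ j ≤ k0 ∧ j < n) := by omega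
          exact if_congr this rfl rfl
      · rw [if_neg hcase]
        intro j
        rw [hY j]
        have : (1 ≤ j ∧ j ≤ k0 - 1 ∧ j < n) ↔ (1 ≤ j ∧ j ≤ k0 ∧ j < n) := by omega
        exact if_congr this rfl rfl
    have hT' : InvT y n ((List.range' k0 (n - k0)).foldl (stepA k0) (t, yc)).1 k0 := by
      obtain ⟨h1, h2, h3, h4⟩ := hin.1
      refine ⟨h1, h2, ?_⟩
      intro i j hi hji hjk
      by_cases hjj : j ≤ k0 - 1
      · exact h3 i j hi hji hjj
      · have hjeq : j = k0 := by omega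
        subst hjeq
        exact h4 i hji (by omega)
    have := ih (k0 + 1) _ _ (by omega) (by omega)
      (by simpa using hT') (by simpa using hY')
    rw [← Prod.mk.eta (p := (List.range' k0 (n - k0)).foldl (stepA k0) (t, yc))]
    exact this

-- ---------- initialization of A's table ----------

theorem build_rows (n : Nat) (r : List Int) :
    ∀ acc : List (List Int), (List.range n).foldl (fun t _ => t ++ [r]) acc = acc ++ List.replicate n r := by
  induction n with
  | zero => intro acc; simp
  | succ n ih =>
    intro acc
    rw [List.range_succ, List.foldl_append, ih, List.replicate_succ']
    simp

theorem init_loop (y : List Int) (n : Nat) :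
    ∀ (m i0 : Nat) (t : List (List Int)), i0 + m ≤ n →
      t.length = n → (∀ i, i < n → (t.getD i []).length = n) →
      (∀ i, i < i0 → eT t i 0 = y.getD i 0) →
      (let t' := (List.range' i0 m).foldl (fun t i => t.set i ((t.getD i []).set 0 (y.getD i 0))) t
       t'.length = n ∧ (∀ i, i < n → (t'.getD i []).length = n) ∧
       (∀ i, i < i0 + m → eT t' i 0 = y.getD i 0)) := by
  intro m
  induction m with
  | zero => intro i0 t h0 h1 h2 h3; simpa using ⟨h1, h2, h3⟩
  | succ m ih =>
    intro i0 t h0 h1 h2 h3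
    rw [List.range'_succ, List.foldl_cons]
    have hi0n : i0 < n := by omega
    have := ih (i0 + 1) (t.set i0 ((t.getD i0 []).set 0 (y.getD i0 0))) (by omega)
      (by simpa using h1)
      (by
        intro i hi
        by_cases hii : i0 = i
        · subst hii
          rw [getD_set_self _ _ _ _ (by omega)]
          simpa using h2 i0 hi0n
        · rw [getD_set_ne _ _ _ _ _ hii]; exact h2 i hi)
      (by
        intro i hi
        by_cases hii : i0 = i
        · subst hii
          unfold eT
          rw [getD_set_self _ _ _ _ (by omega),
            getD_set_self _ _ _ _ (by rw [h2 i0 hi0n]; omega)]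
        · unfold eT
          rw [getD_set_ne _ _ _ _ _ hii]
          exact h3 i (by omega))
    obtain ⟨g1, g2, g3⟩ := this
    refine ⟨g1, g2, ?_⟩
    intro i hi
    exact g3 i (by omega)

-- ---------- B side: binomial rows and the closed-form diagonal ----------

def binomRow (t : Nat) : List Int := (List.range (t + 1)).map (fun j => ((t.choose j : Nat) : Int))
def diagVal (y : List Int) (i : Nat) : Int :=
  ∑ j ∈ Finset.range (i + 1), (-1 : Int) ^ (i - j) * (i.choose j : Nat) * y.getD j 0

theorem binomRow_length (t : Nat) : (binomRow t).length = t + 1 := by simp [binomRow]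

theorem binomRow_getD (t k : Nat) (h : k < t + 1) :
    (binomRow t).getD k 0 = ((t.choose k : Nat) : Int) := by
  rw [List.getD_eq_getElem _ _ (by rw [binomRow_length]; omega)]
  simp [binomRow]

-- Pascal's rule: the row-rebuild of Source B applied to binomRow a is binomRow (a+1)
theorem rowStep_eq (a : Nat) :
    [(1 : Int)] ++ (List.range a).map
        (fun j => (binomRow a).getD j 0 + (binomRow a).getD (j + 1) 0) ++ [(1 : Int)]
      = binomRow (a + 1) := by
  apply List.ext_getElem?
  intro k
  by_cases hk : k < a + 2
  · have hR : (binomRow (a + 1))[k]? = some (((a+1).choose k : Nat) : Int) := by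
      simp [binomRow, (by omega : k < a + 2)]
    rw [hR]
    rcases Nat.eq_zero_or_pos k with hk0 | hkpos
    · subst hk0
      rw [List.getElem?_append_left (by simp)]
      simp
    · by_cases hka : k = a + 1
      · subst hka
        rw [List.getElem?_append_right (by simp)]
        simp
      · obtain ⟨b, rfl⟩ : ∃ b, k = b + 1 := ⟨k - 1, by omega⟩
        have hb : b < a := by omega
        rw [List.getElem?_append_left (by simp; omega), List.singleton_append,
          List.getElem?_cons_succ, List.getElem?_map, List.getElem?_range hb]
        simp only [Option.map_some]
        rw [binomRow_getD a b (by omega), binomRow_getD a (b + 1) (by omega)]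
        rw [Nat.choose_succ_succ]
        push_cast
        simp
  · rw [List.getElem?_eq_none (by simp; omega), List.getElem?_eq_none (by rw [binomRow_length]; omega)]

-- the alternating inner fold is the signed dot product
theorem inner_fold (y row : List Int) (i : Nat) :
    ∀ (m : Nat) (a : Int),
      (List.range m).foldl (fun acc j =>
          if (i - j) % 2 = 0 then acc + row.getD j 0 * y.getD j 0
          else acc - row.getD j 0 * y.getD j 0) a
        = a + ∑ j ∈ Finset.range m, (-1 : Int) ^ (i - j) * row.getD j 0 * y.getD j 0 := by
  intro m
  induction m with
  | zero => intro a; simp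
  | succ m ih =>
    intro a
    rw [List.range_succ, List.foldl_append, ih, List.foldl_cons, List.foldl_nil,
      Finset.sum_range_succ]
    by_cases hp : (i - m) % 2 = 0
    · have : (-1 : Int) ^ (i - m) = 1 := Even.neg_one_pow (Nat.even_iff.mpr hp)
      simp only [hp, if_true, this]
      ring
    · have : (-1 : Int) ^ (i - m) = -1 :=
        Odd.neg_one_pow (Nat.odd_iff.mpr (by omega))
      simp only [hp, if_false, this]
      ring

-- the diagonal of the difference table in closed form
theorem fD_binom (y : List Int) (n : Nat) (hny : n ≤ y.length) :
    ∀ (k i : Nat), k ≤ i → i < n →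
      fD y n i k = ∑ m ∈ Finset.range (k + 1),
        (-1 : Int) ^ (k - m) * (k.choose m : Nat) * y.getD (i - k + m) 0 := by
  intro k
  induction k with
  | zero =>
    intro i hki hin
    rw [fD_zero y n i hin hny]
    simp
  | succ k ih =>
    intro i hki hin
    rw [fD_rec y n i (k + 1) (by omega) hki hin hny]
    simp only [Nat.add_sub_cancel]
    rw [ih i (by omega) hin, ih (i - 1) (by omega) (by omega)]
    -- RHS: split off the m = 0 term and reindex
    rw [Finset.sum_range_succ' (fun m => (-1 : Int) ^ (k + 1 - m) * ((k+1).choose m : Nat) * y.getD (i - (k + 1) + m) 0) (k + 1)]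
    have hre : ∀ m ∈ Finset.range (k + 1),
        (-1 : Int) ^ (k + 1 - (m + 1)) * ((k+1).choose (m + 1) : Nat) * y.getD (i - (k + 1) + (m + 1)) 0
          = (-1 : Int) ^ (k - m) * (k.choose m : Nat) * y.getD (i - k + m) 0
            + (-1 : Int) ^ (k - m) * (k.choose (m + 1) : Nat) * y.getD (i - k + m) 0 := by
      intro m hm
      rw [Finset.mem_range] at hm
      have h1 : k + 1 - (m + 1) = k - m := by omega
      have h2 : i - (k + 1) + (m + 1) = i - k + m := by omega
      rw [h1, h2, Nat.choose_succ_succ]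
      push_cast
      ring
    rw [Finset.sum_congr rfl hre, Finset.sum_add_distrib]
    -- now: Σ C(k,m) terms match the first sum; remains: -fD(i-1) part = shifted sum + m=0 term
    have hmain : ∑ m ∈ Finset.range (k + 1), (-1 : Int) ^ (k - m) * (k.choose m : Nat) * y.getD (i - 1 - k + m) 0
        = - (∑ m ∈ Finset.range (k + 1), (-1 : Int) ^ (k - m) * (k.choose (m + 1) : Nat) * y.getD (i - k + m) 0)
          - (-1 : Int) ^ (k + 1 - 0) * ((k+1).choose 0 : Nat) * y.getD (i - (k + 1) + 0) 0 := by
      rw [Finset.sum_range_succ' (fun m => (-1 : Int) ^ (k - m) * (k.choose m : Nat) * y.getD (i - 1 - k + m) 0) k]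
      rw [Finset.sum_range_succ (fun m => (-1 : Int) ^ (k - m) * (k.choose (m + 1) : Nat) * y.getD (i - k + m) 0) k]
      have hz : (k.choose (k + 1) : Int) = 0 := by
        rw [Nat.choose_eq_zero_of_lt (by omega)]; simp
      rw [hz]
      have hre2 : ∀ m ∈ Finset.range k,
          (-1 : Int) ^ (k - (m + 1)) * (k.choose (m + 1) : Nat) * y.getD (i - 1 - k + (m + 1)) 0
            = - ((-1 : Int) ^ (k - m) * (k.choose (m + 1) : Nat) * y.getD (i - k + m) 0) := by
        intro m hm
        rw [Finset.mem_range] at hm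
        have h2 : i - 1 - k + (m + 1) = i - k + m := by omega
        have h3 : k - m = (k - (m + 1)) + 1 := by omega
        rw [h2, h3, pow_succ]
        ring
      rw [Finset.sum_congr rfl hre2, Finset.sum_neg_distrib]
      have h4 : i - 1 - k + 0 = i - (k + 1) + 0 := by omega
      have h5 : (-1 : Int) ^ (k - 0) = - (-1 : Int) ^ (k + 1 - 0) := by
        rw [show k + 1 - 0 = (k - 0) + 1 by omega, pow_succ]; ring
      rw [h4, h5]
      simp
      ring
    rw [hmain]
    ring

-- one step of B's fold
def stepB (y : List Int) (st : List Int × List Int) (i : Nat) : List Int × List Int :=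
  let row := if i ≠ 0 then
      [(1 : Int)] ++ (List.range (i - 1)).map (fun j => st.2.getD j 0 + st.2.getD (j + 1) 0) ++ [(1 : Int)]
    else st.2
  let acc := (List.range (i + 1)).foldl (fun acc j =>
      let c := row.getD j 0 * y.getD j 0
      if (i - j) % 2 = 0 then acc + c else acc - c) 0
  (st.1 ++ [acc], row)

theorem portB_eq (x y : List Int) :
    schema_lui_Aitken_alt x y = ((List.range x.length).foldl (stepB y) ([], [(1 : Int)])).1 ++ y.drop x.length := rfl

theorem alt_fold (y : List Int) : ∀ (m : Nat),
    (List.range m).foldl (stepB y) ([], [(1 : Int)])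
      = ((List.range m).map (fun i => diagVal y i), binomRow (m - 1)) := by
  intro m
  induction m with
  | zero =>
    simp [binomRow]
  | succ m ih =>
    have hrow : (if m ≠ 0 then
        [(1 : Int)] ++ (List.range (m - 1)).map
          (fun j => (binomRow (m - 1)).getD j 0 + (binomRow (m - 1)).getD (j + 1) 0) ++ [(1 : Int)]
      else binomRow (m - 1)) = binomRow m := by
      by_cases hm : m = 0
      · subst hm; simp
      · obtain ⟨a, rfl⟩ : ∃ a, m = a + 1 := ⟨m - 1, by omega⟩
        rw [if_pos hm]
        simpa using rowStep_eq a
    rw [List.range_succ, List.foldl_append, ih, List.foldl_cons, List.foldl_nil,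
      List.map_append]
    simp only [stepB]
    rw [hrow]
    simp only [Prod.mk.injEq]
    constructor
    · simp only [List.map_cons, List.map_nil]
      congr 1
      rw [inner_fold y (binomRow m) m (m + 1) 0, zero_add]
      unfold diagVal
      congr 1
      apply Finset.sum_congr rfl
      intro j hj
      rw [Finset.mem_range] at hj
      rw [binomRow_getD m j (by omega)]
    · simp

-- characterization of B's output
theorem alt_eq (x y : List Int) :
    schema_lui_Aitken_alt x y = ((List.range x.length).map (fun i => diagVal y i)) ++ y.drop x.length := by
  rw [portB_eq, alt_fold]

-- B's closed-form entry equals the table diagonal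
theorem diagVal_eq_fD (x y : List Int) (hny : x.length ≤ y.length) (i : Nat) (hi : i < x.length) :
    diagVal y i = fD y x.length i i := by
  rw [fD_binom y x.length hny i i (le_refl i) hi]
  unfold diagVal
  apply Finset.sum_congr rfl
  intro j hj
  rw [Finset.mem_range] at hj
  congr 2
  omega

-- port A written with stepA (definitionally the same folds)
theorem portA_eq (x y : List Int) :
    schema_lui_Aitken x y =
      ((List.range' 1 x.length).foldl
        (fun (st : List (List Int) × List Int) k => (List.range' k (x.length - k)).foldl (stepA k) st)
        (((List.range x.length).foldl (fun t i => t.set i ((t.getD i []).set 0 (y.getD i 0)))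
          ((List.range x.length).foldl (fun t _ => t ++ [List.replicate x.length (0 : Int)]) [])), y)).2 := rfl

-- ===== VERDICT (by name: the statement is the Claim_ definition above) =====
theorem schema_lui_Aitken_spec : Claim_equal_schema_lui_Aitken := by
  intro x y _ hpre
  unfold Spec_schema_lui_Aitken
  unfold Pre_schema_lui_Aitken at hpre
  set n := x.length with hn
  -- initial table
  have hbuild := build_rows n (List.replicate n 0) []
  rw [List.nil_append] at hbuild
  have hinit := init_loop y n n 0 (List.replicate n (List.replicate n 0)) (by omega)
    (by simp) (by intro i hi; rw [List.getD_eq_getElem _ _ (by simpa using hi)]; simp)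
    (by intro i hi; omega)
  obtain ⟨g1, g2, g3⟩ := hinit
  set t0 := (List.range' 0 n).foldl (fun t i => t.set i ((t.getD i []).set 0 (y.getD i 0)))
    (List.replicate n (List.replicate n 0)) with ht0
  have hT0 : InvT y n t0 0 := by
    refine ⟨g1, g2, ?_⟩
    intro i j hi hji hj0
    have hj : j = 0 := by omega
    subst hj
    rw [g3 i (by omega), fD_zero y n i hi hpre]
  have hY0 : InvY y n y 0 := by
    intro j
    have : ¬ (1 ≤ j ∧ j ≤ 0 ∧ j < n) := by omega
    rw [if_neg this]
  have houter := outer_loop y n hpre n 1 t0 y (le_refl _) (by omega)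
    (by simpa using hT0) (by simpa using hY0)
  rw [portA_eq x y, ← hn, hbuild, List.range_eq_range', ← ht0]
  have hY := houter
  rw [alt_eq x y, ← hn]
  apply List.ext_getElem?
  intro j
  rw [hY j]
  by_cases hjn : j < n
  · rw [List.getElem?_append_left (by simpa using hjn)]
    rw [List.getElem?_map, List.getElem?_range hjn]
    simp only [Option.map_some]
    rw [diagVal_eq_fD x y hpre j (by omega)]
    by_cases hj1 : 1 ≤ j
    · rw [if_pos ⟨hj1, by omega, hjn⟩]
    · have hj0 : j = 0 := by omega
      subst hj0
      rw [if_neg (by omega)]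
      rw [List.getElem?_eq_getElem (by omega : 0 < y.length)]
      congr 1
      rw [← hn, fD_zero y n 0 hjn hpre, List.getD_eq_getElem _ _ (by omega)]
  · rw [if_neg (by omega)]
    rw [List.getElem?_append_right (by simpa using hjn)]
    simp only [List.length_map, List.length_range]
    rw [List.getElem?_drop]
    congr 1
    omega
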